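-- pv_equiv track=rewrite | github.com/BenjaminMummery/pre-commit-hooks | sort_file_contents_hook/sort_file_contents.py | _separate_leading_comment
-- ===== SOURCE A (Python) =====
-- import typing as t
--
-- def _separate_leading_comment(
--     lines: t.List[str],
-- ) -> t.Tuple[t.Union[t.List[str], None], t.Union[t.List[str], None]]:
--     """
--     Separate a leading comment string or strings from a list of strings.
--
--     Arguments:
--         lines (list of str): the lines to be parsed.
--
--     Returns:
--         list of str (optional), list of str (optional): the list of comment lines and
--             sortable lines respectively. If no lines of the specified type were found,
--             returns None.
--     """
--     comment_lines: t.Optional[t.List[str]] = None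
--     sortable_lines: t.Optional[t.List[str]] = None
--
--     for i, line in enumerate(lines):
--         if not line.startswith("#"):
--             sortable_lines = lines[i:]
--             break
--
--         if comment_lines is None:
--             comment_lines = [line]
--         else:
--             comment_lines.append(line)
--
--     return comment_lines, sortable_lines
-- ===== SOURCE B (Python) =====
-- import typing as t
--
-- def _separate_leading_comment(
--     lines: t.List[str],
-- ) -> t.Tuple[t.Union[t.List[str], None], t.Union[t.List[str], None]]:
--     """Find the boundary index first, then slice both sides."""
--     n = next((i for i, line in enumerate(lines) if not line.startswith("#")), len(lines))
--     comment_lines = lines[:n] if n > 0 else None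
--     sortable_lines = lines[n:] if n < len(lines) else None
--     return comment_lines, sortable_lines
-- ===== Notes on version B (the rewrite author's own statement) =====
-- stated objective: simpler
-- what changed: Replaces the accumulate-comments-while-scanning-with-break loop by computing the boundary index n (first non-'#' line) with a single next/enumerate scan and then slicing lines[:n] and lines[n:], mapping empty slices to None.
import Mathlib
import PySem

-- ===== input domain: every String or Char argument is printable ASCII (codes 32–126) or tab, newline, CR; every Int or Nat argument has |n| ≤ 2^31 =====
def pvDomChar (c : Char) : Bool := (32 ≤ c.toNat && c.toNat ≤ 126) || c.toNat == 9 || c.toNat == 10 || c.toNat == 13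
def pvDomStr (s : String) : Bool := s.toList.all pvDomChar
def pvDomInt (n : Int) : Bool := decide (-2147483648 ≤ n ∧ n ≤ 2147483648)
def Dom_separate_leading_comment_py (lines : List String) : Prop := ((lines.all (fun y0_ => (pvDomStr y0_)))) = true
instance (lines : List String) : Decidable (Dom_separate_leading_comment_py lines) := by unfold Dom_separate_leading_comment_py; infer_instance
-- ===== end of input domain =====

-- B computes the boundary index first and slices both sides, instead of A's
-- accumulate-while-scanning-with-break loop (objective: simpler decomposition).


-- ===== PORT A =====
-- the for-loop over enumerate(lines), with break: state is comment_lines (sortable is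
-- only set at the break, so it is returned directly there)
def pvALoop (lines : List String) : List (Int × String) → Option (List String) → Option (List String) × Option (List String)
  | [], c => (c, none)
  | (i, line) :: rest, c =>
    if ¬ PySem.Str.startswith line "#" then
      (c, some (PySem.List.slice lines (some i) none))      -- sortable_lines = lines[i:]; break
    else
      match c with
      | none => pvALoop lines rest (some [line])
      | some cs => pvALoop lines rest (some (cs ++ [line]))

def separate_leading_comment_py (lines : List String) : Option (List String) × Option (List String) :=
  pvALoop lines (PySem.List.enumerate lines 0) none

-- ===== PORT B =====
-- n = next((i for i, line in enumerate(lines) if not line.startswith("#")), len(lines))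
def pvBFind : List String → Nat
  | [] => 0
  | line :: rest => if PySem.Str.startswith line "#" then 1 + pvBFind rest else 0

def separate_leading_comment_py_alt (lines : List String) : Option (List String) × Option (List String) :=
  let n := pvBFind lines
  ((if n > 0 then some (lines.take n) else none),
   (if n < lines.length then some (lines.drop n) else none))

-- ===== PRECONDITION & SPEC =====
def Spec_separate_leading_comment_py (lines : List String) (out : Option (List String) × Option (List String)) : Prop := out = separate_leading_comment_py_alt lines
instance (lines : List String) (out : Option (List String) × Option (List String)) : Decidable (Spec_separate_leading_comment_py lines out) := by unfold Spec_separate_leading_comment_py; infer_instance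

-- ===== CLAIM (what is proved, stated in full; the proofs are below) =====
def Claim_equal_separate_leading_comment_py : Prop := ∀ (lines : List String), Dom_separate_leading_comment_py lines → Spec_separate_leading_comment_py lines (separate_leading_comment_py lines)

-- ===== LEMMAS AND PROOFS =====

lemma pvALoop_char (suf : List String) : ∀ (pre : List String) (c : Option (List String)),
    pvALoop (pre ++ suf) (PySem.List.enumerate suf (pre.length : Int)) c =
      ((if 0 < pvBFind suf then some (c.getD [] ++ suf.take (pvBFind suf)) else c),
       (if pvBFind suf < suf.length then some ((pre ++ suf).drop (pre.length + pvBFind suf)) else none)) := by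
  induction suf with
  | nil =>
    intro pre c
    simp [pvALoop, PySem.List.enumerate, pvBFind]
  | cons line rest ih =>
    intro pre c
    rw [PySem.List.enumerate_cons]
    by_cases h : PySem.Str.startswith line "#"
    · have h' := h; simp at h'
      have hb : pvBFind (line :: rest) = 1 + pvBFind rest := by simp [pvBFind, h']
      have hcast : ((pre.length : Int) + 1) = (((pre ++ [line]).length : Nat) : Int) := by simp
      have hassoc : pre ++ line :: rest = (pre ++ [line]) ++ rest := by simp
      rw [hb]
      cases c with
      | none =>
        simp only [pvALoop, if_neg (not_not_intro h)]
        rw [hassoc, hcast, ih (pre ++ [line]) (some [line])]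
        simp only [Prod.mk.injEq, Option.getD_some, Option.getD_none]
        refine ⟨?_, ?_⟩
        · have hp : 0 < 1 + pvBFind rest := by omega
          rw [if_pos hp, show 1 + pvBFind rest = pvBFind rest + 1 from Nat.add_comm 1 _,
            List.take_succ_cons]
          rcases Nat.eq_zero_or_pos (pvBFind rest) with h0 | h0 <;> simp [h0]
        · by_cases h2 : pvBFind rest < rest.length
          · rw [if_pos h2, if_pos (by simp only [List.length_cons]; omega)]
            rw [← hassoc]
            congr 2
            simp only [List.length_append, List.length_cons, List.length_nil]
            omega
          · rw [if_neg h2, if_neg (by simp only [List.length_cons]; omega)]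
      | some cs =>
        simp only [pvALoop, if_neg (not_not_intro h)]
        rw [hassoc, hcast, ih (pre ++ [line]) (some (cs ++ [line]))]
        simp only [Prod.mk.injEq, Option.getD_some]
        refine ⟨?_, ?_⟩
        · have hp : 0 < 1 + pvBFind rest := by omega
          rw [if_pos hp, show 1 + pvBFind rest = pvBFind rest + 1 from Nat.add_comm 1 _,
            List.take_succ_cons]
          rcases Nat.eq_zero_or_pos (pvBFind rest) with h0 | h0 <;> simp [h0]
        · by_cases h2 : pvBFind rest < rest.length
          · rw [if_pos h2, if_pos (by simp only [List.length_cons]; omega)]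
            rw [← hassoc]
            congr 2
            simp only [List.length_append, List.length_cons, List.length_nil]
            omega
          · rw [if_neg h2, if_neg (by simp only [List.length_cons]; omega)]
    · have h' : PySem.Str.startswith line "#" = false := by
        revert h; cases hx : PySem.Str.startswith line "#" <;> simp
      have hs := h'; simp at hs
      have hb : pvBFind (line :: rest) = 0 := by simp [pvBFind, hs]
      simp only [pvALoop, if_pos h]
      rw [PySem.List.slice_from_natCast, hb]
      simp

-- ===== VERDICT (by name: the statement is the Claim_ definition above) =====
theorem separate_leading_comment_py_spec : Claim_equal_separate_leading_comment_py := by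
  intro lines _
  unfold Spec_separate_leading_comment_py
  have h := pvALoop_char lines [] none
  simpa [separate_leading_comment_py, separate_leading_comment_py_alt] using h
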